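-- pv_equiv track=rewrite | github.com/jonathan17ux/Cerebro | backend/sync/router.py | _hash_suffix
-- ===== SOURCE A (Python) =====
-- def _hash_suffix(expert_id: str) -> str:
--     """Deterministic 6-char base36 hash, matching the TS hashSuffix."""
--     h = 0
--     for ch in expert_id:
--         h = (h * 31 + ord(ch)) & 0xFFFFFFFF
--     # Simulate TS `| 0` (signed 32-bit)
--     if h & 0x80000000:
--         h -= 0x100000000
--     h = abs(h)
--     alphabet = "0123456789abcdefghijklmnopqrstuvwxyz"
--     if h == 0:
--         return "000000"
--     digits: list[str] = []
--     while h: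
--         digits.append(alphabet[h % 36])
--         h //= 36
--     s = "".join(reversed(digits))
--     return s[:6] if len(s) >= 6 else s.rjust(6, "0")
-- ===== SOURCE B (Python) =====
-- def _hash_suffix(expert_id: str) -> str:
--     """Deterministic 6-char base36 hash, matching the TS hashSuffix."""
--     h = 0
--     for ch in expert_id:
--         h = (h * 31 + ord(ch)) & 0xFFFFFFFF
--     if h & 0x80000000:
--         h -= 0x100000000
--     h = abs(h)
--     alphabet = "0123456789abcdefghijklmnopqrstuvwxyz"
--     digits = []
--     for _ in range(6):
--         h, r = divmod(h, 36)
--         digits.append(alphabet[r])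
--     return "".join(reversed(digits))
-- ===== Notes on version B (the rewrite author's own statement) =====
-- stated objective: simpler
-- what changed: The variable-length digit phase (while h, reverse, h==0 special case, pad-or-truncate branch) is replaced by a fixed-width conversion: exactly six divmod(h,36) steps always produce six digits, so the zero guard and the rjust/[:6] branch disappear; equivalence rests on abs(signed32) <= 2^31 < 36^6.
import Mathlib
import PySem

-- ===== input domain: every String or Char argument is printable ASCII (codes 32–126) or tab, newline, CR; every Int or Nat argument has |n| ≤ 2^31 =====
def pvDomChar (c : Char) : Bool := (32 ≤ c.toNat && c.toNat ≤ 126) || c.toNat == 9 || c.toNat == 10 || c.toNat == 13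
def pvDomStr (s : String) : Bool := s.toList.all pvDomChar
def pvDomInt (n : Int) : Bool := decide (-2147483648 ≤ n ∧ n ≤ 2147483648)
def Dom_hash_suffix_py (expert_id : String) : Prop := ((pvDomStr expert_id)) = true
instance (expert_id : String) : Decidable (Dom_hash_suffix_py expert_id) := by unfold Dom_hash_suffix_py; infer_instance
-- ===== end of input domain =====

-- B replaces the variable-length digit loop + zero guard + pad/truncate branch by a
-- fixed-width conversion of always exactly six base36 divmod steps (objective: simpler).


-- alphabet = "0123456789abcdefghijklmnopqrstuvwxyz" (same constant in A and in B)
def pvAlphabet : List Char := "0123456789abcdefghijklmnopqrstuvwxyz".toList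

-- ===== PORT A =====
-- while h: digits.append(alphabet[h % 36]); h //= 36
-- (reached only after h = abs(...), so h ≥ 0: the loop state is carried as a Nat, on which
--  Python's % and // agree with Nat's; the index h % 36 < 36 is always in range, so the
--  getD default is never used and alphabet[h % 36] is exact.)
def pvWhileDigits (h : Nat) : List Char :=
  if h = 0 then []
  else pvAlphabet.getD (h % 36) '0' :: pvWhileDigits (h / 36)
decreasing_by exact Nat.div_lt_self (Nat.pos_of_ne_zero (by assumption)) (by norm_num)

def hash_suffix_py (expert_id : String) : String :=
  -- h = 0; for ch in expert_id: h = (h * 31 + ord(ch)) & 0xFFFFFFFF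
  let h0 : Int := expert_id.toList.foldl
    (fun h ch => PySem.Int.band (h * 31 + (ch.toNat : Int)) 4294967295) 0
  -- if h & 0x80000000: h -= 0x100000000
  let h1 : Int := if PySem.Int.band h0 2147483648 ≠ 0 then h0 - 4294967296 else h0
  -- h = abs(h)  (abs of an Int is a Nat value; carried as Nat below)
  let h : Nat := h1.natAbs
  if h = 0 then "000000"
  else
    -- s = "".join(reversed(digits))
    let s := (pvWhileDigits h).reverse
    -- return s[:6] if len(s) >= 6 else s.rjust(6, "0")
    if 6 ≤ s.length then String.ofList (s.take 6)
    else String.ofList (List.replicate (6 - s.length) '0' ++ s)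

-- ===== PORT B =====
-- for _ in range(6): h, r = divmod(h, 36); digits.append(alphabet[r])
-- (h ≥ 0 throughout, carried as Nat; the fuel argument is the remaining range(6) count)
def pvSixDigits (h : Nat) : Nat → List Char
  | 0 => []
  | n + 1 => pvAlphabet.getD (h % 36) '0' :: pvSixDigits (h / 36) n

def hash_suffix_py_alt (expert_id : String) : String :=
  let h0 : Int := expert_id.toList.foldl
    (fun h ch => PySem.Int.band (h * 31 + (ch.toNat : Int)) 4294967295) 0
  let h1 : Int := if PySem.Int.band h0 2147483648 ≠ 0 then h0 - 4294967296 else h0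
  -- return "".join(reversed(digits))
  String.ofList ((pvSixDigits h1.natAbs 6).reverse)

-- ===== PRECONDITION & SPEC =====
def Spec_hash_suffix_py (expert_id : String) (out : String) : Prop := out = hash_suffix_py_alt expert_id
instance (expert_id : String) (out : String) : Decidable (Spec_hash_suffix_py expert_id out) := by unfold Spec_hash_suffix_py; infer_instance

-- ===== CLAIM (what is proved, stated in full; the proofs are below) =====
def Claim_equal_hash_suffix_py : Prop := ∀ (expert_id : String), Dom_hash_suffix_py expert_id → Spec_hash_suffix_py expert_id (hash_suffix_py expert_id)

-- ===== LEMMAS AND PROOFS =====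

-- One masking step keeps the accumulator in [0, 2^32).
theorem pv_step_bound (h c : Int) (hh : 0 ≤ h) (hc : 0 ≤ c) :
    0 ≤ PySem.Int.band (h * 31 + c) 4294967295 ∧
    PySem.Int.band (h * 31 + c) 4294967295 < 4294967296 := by
  have ha : (0:Int) ≤ h * 31 + c := by positivity
  rw [PySem.Int.band_of_nonneg ha (by norm_num)]
  have : (h * 31 + c).toNat &&& (4294967295:Int).toNat = (h * 31 + c).toNat % 2 ^ 32 := by
    have := Nat.and_two_pow_sub_one_eq_mod (h * 31 + c).toNat 32
    norm_num at this ⊢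
    exact this
  rw [this]
  have := Nat.mod_lt (h * 31 + c).toNat (y := 2 ^ 32) (by norm_num)
  constructor
  · exact Int.natCast_nonneg _
  · exact_mod_cast this

-- The folded hash lies in [0, 2^32).
theorem pv_fold_bound (l : List Char) :
    ∀ h : Int, 0 ≤ h →
      0 ≤ l.foldl (fun h ch => PySem.Int.band (h * 31 + (ch.toNat : Int)) 4294967295) h ∧
      (l = [] → l.foldl (fun h ch => PySem.Int.band (h * 31 + (ch.toNat : Int)) 4294967295) h = h) ∧
      (l ≠ [] → l.foldl (fun h ch => PySem.Int.band (h * 31 + (ch.toNat : Int)) 4294967295) h < 4294967296) := by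
  induction l with
  | nil => intro h hh; exact ⟨hh, fun _ => rfl, fun hne => absurd rfl hne⟩
  | cons c t ih =>
    intro h hh
    have hs := pv_step_bound h (c.toNat : Int) hh (Int.natCast_nonneg _)
    have iht := ih _ hs.1
    refine ⟨iht.1, fun h0 => by simp at h0, fun _ => ?_⟩
    rcases eq_or_ne t [] with rfl | hne
    · simpa using hs.2
    · exact iht.2.2 hne

-- Sign-bit test: for 0 ≤ h < 2^32, h & 0x80000000 ≠ 0 ↔ 2^31 ≤ h.
theorem pv_signbit (h : Int) (h0 : 0 ≤ h) (h1 : h < 4294967296) :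
    (PySem.Int.band h 2147483648 ≠ 0 ↔ 2147483648 ≤ h) := by
  rw [PySem.Int.band_of_nonneg h0 (by norm_num)]
  have hb : h.toNat &&& (2147483648:Int).toNat = (h.toNat.testBit 31).toNat * 2 ^ 31 := by
    have := Nat.and_two_pow h.toNat 31
    norm_num at this ⊢
    exact this
  rw [hb]
  have htn : h.toNat < 2 ^ 32 := by omega
  constructor
  · intro hne
    by_contra hlt
    push_neg at hlt
    have : h.toNat < 2 ^ 31 := by omega
    rw [Nat.testBit_eq_false_of_lt this] at hne
    simp at hne
  · intro hge
    have hdiv : h.toNat / 2 ^ 31 = 1 := by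
      have : 2 ^ 31 ≤ h.toNat := by omega
      omega
    rw [Nat.testBit_eq_decide_div_mod_eq, hdiv]
    norm_num

-- pvSixDigits produces exactly k digits.
theorem pv_six_len (k : Nat) : ∀ h, (pvSixDigits h k).length = k := by
  induction k with
  | zero => intro h; rfl
  | succ n ih => intro h; simp [pvSixDigits, ih]

theorem pv_six_zero (k : Nat) : pvSixDigits 0 k = List.replicate k '0' := by
  induction k with
  | zero => rfl
  | succ n ih => simp [pvSixDigits, ih, List.replicate_succ, pvAlphabet]

-- Fixed-width conversion = variable-length conversion padded on the right with '0'.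
theorem pv_six_eq_while (k : Nat) :
    ∀ h, h < 36 ^ k →
      pvSixDigits h k = pvWhileDigits h ++ List.replicate (k - (pvWhileDigits h).length) '0' := by
  induction k with
  | zero =>
    intro h hlt
    have : h = 0 := by simpa using hlt
    subst this
    simp [pvSixDigits, pvWhileDigits]
  | succ n ih =>
    intro h hlt
    rcases eq_or_ne h 0 with rfl | hne
    · simp [pvWhileDigits, pv_six_zero]
    · rw [pvWhileDigits, if_neg hne]
      have hdiv : h / 36 < 36 ^ n := by
        rw [Nat.div_lt_iff_lt_mul (by norm_num)]
        calc h < 36 ^ (n + 1) := hlt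
          _ = 36 ^ n * 36 := by ring
      rw [pvSixDigits, ih _ hdiv]
      simp only [List.length_cons, List.cons_append, Nat.succ_sub_succ]

-- The variable-length conversion has at most k digits when h < 36^k.
theorem pv_while_len_le (k : Nat) (h : Nat) (hlt : h < 36 ^ k) :
    (pvWhileDigits h).length ≤ k := by
  have := congrArg List.length (pv_six_eq_while k h hlt)
  rw [pv_six_len] at this
  simp at this
  omega

-- Core: for 0 ≤ h ≤ 2^31, A's digit phase equals B's digit phase.
theorem pv_finish_eq (h : Nat) (hle : h ≤ 2147483648) :
    (if h = 0 then "000000"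
     else
       let s := (pvWhileDigits h).reverse
       if 6 ≤ s.length then String.ofList (s.take 6)
       else String.ofList (List.replicate (6 - s.length) '0' ++ s)) =
    String.ofList ((pvSixDigits h 6).reverse) := by
  have hlt : h < 36 ^ 6 := by omega
  rcases eq_or_ne h 0 with rfl | hne
  · simp [pv_six_zero]
  · rw [if_neg hne]
    have hkey := pv_six_eq_while 6 h hlt
    have hlen := pv_while_len_le 6 h hlt
    simp only [List.length_reverse]
    rcases Nat.lt_or_ge (pvWhileDigits h).length 6 with hlt6 | hge6
    · rw [if_neg (by omega), hkey, List.reverse_append, List.reverse_replicate]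
    · have h6 : (pvWhileDigits h).length = 6 := by omega
      rw [if_pos (by omega), hkey, h6]
      simp only [Nat.sub_self, List.replicate_zero, List.append_nil]
      rw [List.take_of_length_le (le_of_eq (by simp [h6]))]

-- ===== VERDICT (by name: the statement is the Claim_ definition above) =====
theorem hash_suffix_py_spec : Claim_equal_hash_suffix_py := by
  unfold Claim_equal_hash_suffix_py Spec_hash_suffix_py
  intro expert_id _
  unfold hash_suffix_py hash_suffix_py_alt
  set f := fun (h : Int) (ch : Char) => PySem.Int.band (h * 31 + (ch.toNat : Int)) 4294967295 with hf
  set h0 := expert_id.toList.foldl f 0 with hh0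
  have hb := pv_fold_bound expert_id.toList 0 le_rfl
  have hb0 : 0 ≤ h0 := hb.1
  have hb1 : h0 < 4294967296 := by
    rcases eq_or_ne expert_id.toList [] with he | hne
    · rw [hh0, hb.2.1 he]; norm_num
    · exact hb.2.2 hne
  set h1 := if PySem.Int.band h0 2147483648 ≠ 0 then h0 - 4294967296 else h0 with hh1
  have habs : h1.natAbs ≤ 2147483648 := by
    rw [hh1]
    split_ifs with hs
    · have := (pv_signbit h0 hb0 hb1).mp hs
      omega
    · have := (pv_signbit h0 hb0 hb1).not.mp hs
      push_neg at this
      omega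
  exact pv_finish_eq h1.natAbs habs
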